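-- pv_equiv track=rewrite | github.com/mohammedoussamachelly-debug/recruitai | core/analyzer.py | _looks_like_role_or_section
-- ===== SOURCE A (Python) =====
-- import unicodedata
--
-- def _normalize_ascii(text: str) -> str:
--     if not isinstance(text, str):
--         return ""
--     return "".join(
--         ch for ch in unicodedata.normalize("NFKD", text) if not unicodedata.combining(ch)
--     ).lower()
--
-- def _looks_like_role_or_section(text: str) -> bool:
--     if not isinstance(text, str):
--         return True
--     lower = _normalize_ascii(text).strip()
--     role_tokens = [
--         "developer",
--         "engineer",
--         "scientist",
--         "manager",
--         "responsable",
--         "consultant",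
--         "intern",
--         "stagiaire",
--         "full stack",
--         "backend",
--         "front end",
--         "frontend",
--         "analyst",
--         "lead",
--         "architect",
--         "specialist",
--         "officer",
--         "director",
--         "head of",
--         "product",
--         "project",
--         "hr",
--         "resources humaines",
--     ]
--     section_tokens = [
--         "profile",
--         "summary",
--         "experience",
--         "experience professionnelle",
--         "parcours professionnel",
--         "education",
--         "formation",
--         "skills",
--         "competences",
--         "competences techniques",
--         "projets",
--         "certifications",
--         "curriculum vitae",
--         "cv",
--     ]
--     return any(token in lower for token in role_tokens + section_tokens)
-- ===== SOURCE B (Python) =====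
-- import unicodedata
--
-- def _normalize_ascii(text: str) -> str:
--     if not isinstance(text, str):
--         return ""
--     return "".join(
--         ch for ch in unicodedata.normalize("NFKD", text) if not unicodedata.combining(ch)
--     ).lower()
--
-- _ALL_TOKENS = [
--     "developer", "engineer", "scientist", "manager", "responsable",
--     "consultant", "intern", "stagiaire", "full stack", "backend",
--     "front end", "frontend", "analyst", "lead", "architect",
--     "specialist", "officer", "director", "head of", "product",
--     "project", "hr", "resources humaines",
--     "profile", "summary", "experience", "experience professionnelle",
--     "parcours professionnel", "education", "formation", "skills",
--     "competences", "competences techniques", "projets", "certifications",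
--     "curriculum vitae", "cv",
-- ]
--
-- _BY_FIRST = {}
-- for _tok in _ALL_TOKENS:
--     _BY_FIRST.setdefault(_tok[0], []).append(_tok)
--
-- def _looks_like_role_or_section(text: str) -> bool:
--     if not isinstance(text, str):
--         return True
--     lower = _normalize_ascii(text).strip()
--     # single left-to-right pass: at each position, only tokens whose first
--     # character matches are tried (first-character index instead of one full
--     # substring scan per token)
--     for i, ch in enumerate(lower):
--         for tok in _BY_FIRST.get(ch, ()):
--             if lower.startswith(tok, i):
--                 return True
--     return False
-- ===== Notes on version B (the rewrite author's own statement) =====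
-- stated objective: alternative
-- what changed: Replaces the per-token any(token in lower) loop (one full substring scan per token) with a first-character bucket index built once and a single left-to-right pass over the normalized text that only tries tokens whose first character matches the current position.
import Mathlib
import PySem

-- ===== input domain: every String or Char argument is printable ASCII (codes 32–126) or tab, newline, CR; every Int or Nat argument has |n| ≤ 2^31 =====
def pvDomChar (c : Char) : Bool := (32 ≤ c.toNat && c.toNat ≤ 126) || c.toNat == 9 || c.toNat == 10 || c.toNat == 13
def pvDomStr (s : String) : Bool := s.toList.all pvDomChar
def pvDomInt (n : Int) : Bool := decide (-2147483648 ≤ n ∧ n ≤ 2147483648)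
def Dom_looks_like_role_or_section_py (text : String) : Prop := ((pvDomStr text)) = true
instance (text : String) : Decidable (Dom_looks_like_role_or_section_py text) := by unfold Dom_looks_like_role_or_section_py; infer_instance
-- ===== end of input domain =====

-- B replaces the per-token substring scans with a first-character bucket index and
-- one left-to-right pass over the normalized text (alternative data structure, same results).


-- ===== PORT A =====
-- _normalize_ascii: on the printable-ASCII domain, NFKD is the identity and no character
-- is combining, so the generator expression returns the string unchanged and only .lower() acts.
def normalize_ascii_py (text : String) : String :=
  PySem.Str.lower text

def pvRoleTokens : List String :=
  ["developer", "engineer", "scientist", "manager", "responsable",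
   "consultant", "intern", "stagiaire", "full stack", "backend",
   "front end", "frontend", "analyst", "lead", "architect",
   "specialist", "officer", "director", "head of", "product",
   "project", "hr", "resources humaines"]

def pvSectionTokens : List String :=
  ["profile", "summary", "experience", "experience professionnelle",
   "parcours professionnel", "education", "formation", "skills",
   "competences", "competences techniques", "projets", "certifications",
   "curriculum vitae", "cv"]

-- the isinstance guard cannot fire for a String argument; the rest is literal
def looks_like_role_or_section_py (text : String) : Bool :=
  let lower := PySem.Str.strip (normalize_ascii_py text)
  (pvRoleTokens ++ pvSectionTokens).any (fun token => PySem.Str.isIn token lower)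

-- ===== PORT B =====
def pvAllTokens : List String :=
  ["developer", "engineer", "scientist", "manager", "responsable",
   "consultant", "intern", "stagiaire", "full stack", "backend",
   "front end", "frontend", "analyst", "lead", "architect",
   "specialist", "officer", "director", "head of", "product",
   "project", "hr", "resources humaines",
   "profile", "summary", "experience", "experience professionnelle",
   "parcours professionnel", "education", "formation", "skills",
   "competences", "competences techniques", "projets", "certifications",
   "curriculum vitae", "cv"]

-- _BY_FIRST: bucket the tokens by their first character (tok[0]; every literal token is
-- nonempty, so headD's default is never consulted)
def pvByFirst : PySem.Dict Char (List (List Char)) :=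
  (pvAllTokens.map (fun t => (t.toList.headD 'a', t.toList))).foldl
    (fun d p => d.modify p.1 [] (fun b => b ++ [p.2])) PySem.Dict.empty

-- the position loop: at suffix (c :: rest) (position i of lower), try the bucket for c;
-- lower.startswith(tok, i) is startswith on the suffix
def pvScanB (l : List Char) : Bool :=
  match l with
  | [] => false
  | c :: rest =>
    ((pvByFirst.getD c []).any (fun tok => PySem.Chars.startswith (c :: rest) tok)) || pvScanB rest

def looks_like_role_or_section_py_alt (text : String) : Bool :=
  let lower := PySem.Str.strip (normalize_ascii_py text)
  pvScanB lower.toList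

-- ===== PRECONDITION & SPEC =====
def Spec_looks_like_role_or_section_py (text : String) (out : Bool) : Prop := out = looks_like_role_or_section_py_alt text
instance (text : String) (out : Bool) : Decidable (Spec_looks_like_role_or_section_py text out) := by unfold Spec_looks_like_role_or_section_py; infer_instance

-- ===== CLAIM (what is proved, stated in full; the proofs are below) =====
def Claim_equal_looks_like_role_or_section_py : Prop := ∀ (text : String), Dom_looks_like_role_or_section_py text → Spec_looks_like_role_or_section_py text (looks_like_role_or_section_py text)

-- ===== LEMMAS AND PROOFS =====

-- the token char-lists B actually matches against
def pvT : List (List Char) := pvAllTokens.map String.toList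

theorem pvT_nonempty : ∀ t ∈ pvT, t ≠ [] := by decide

theorem pvBucket_eq (c : Char) :
    pvByFirst.getD c [] = pvT.filter (fun t => t.headD 'a' == c) := by
  unfold pvByFirst
  rw [PySem.Dict.getD_foldl_modify_append]
  simp [pvT, List.filter_map, List.map_map, Function.comp_def]

theorem pvScanB_eq (l : List Char) :
    pvScanB l = pvT.any (fun t => PySem.Chars.isIn t l) := by
  induction l with
  | nil =>
    simp only [pvScanB]
    symm
    simp only [List.any_eq_false]
    intro t ht
    rcases eq_or_ne t [] with h | h
    · exact absurd h (pvT_nonempty t ht)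
    · rw [PySem.Chars.isIn_iff_infix]
      intro hi
      exact h (List.eq_nil_of_infix_nil hi)
  | cons c rest ih =>
    simp only [pvScanB, ih, pvBucket_eq]
    rw [Bool.eq_iff_iff]
    simp only [Bool.or_eq_true, List.any_eq_true, List.mem_filter,
      PySem.Chars.startswith_iff, PySem.Chars.isIn_iff_infix, beq_iff_eq]
    constructor
    · rintro (⟨t, ⟨ht, _⟩, hp⟩ | ⟨t, ht, hi⟩)
      · exact ⟨t, ht, hp.isInfix⟩
      · exact ⟨t, ht, hi.trans (List.infix_cons_iff.mpr (Or.inr (List.infix_refl rest)) : rest <:+: c :: rest)⟩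
    · rintro ⟨t, ht, hi⟩
      rcases List.infix_cons_iff.mp hi with hp | hi'
      · refine Or.inl ⟨t, ⟨ht, ?_⟩, hp⟩
        rcases t with _ | ⟨a, t'⟩
        · exact absurd rfl (pvT_nonempty [] ht)
        · rcases hp with ⟨s, hs⟩
          have := congrArg (fun x => List.headD x 'a') hs
          simpa using this
      · exact Or.inr ⟨t, ht, hi'⟩

-- ===== VERDICT (by name: the statement is the Claim_ definition above) =====
theorem looks_like_role_or_section_py_spec : Claim_equal_looks_like_role_or_section_py := by
  intro text _
  unfold Spec_looks_like_role_or_section_py looks_like_role_or_section_py looks_like_role_or_section_py_alt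
  rw [pvScanB_eq]
  show (pvRoleTokens ++ pvSectionTokens).any _ = _
  have : pvRoleTokens ++ pvSectionTokens = pvAllTokens := by decide
  rw [this]
  simp [pvT, List.any_map, Function.comp_def, PySem.Str.isIn_eq]
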